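-- pv_equiv track=rewrite | github.com/DNKonanov/Snapper | snapper/src/motif_extraction.py | crop_variant
-- ===== SOURCE A (Python) =====
-- regular_letters = set(['A','G','C','T'])
--
-- def crop_variant(variant):
--
--     new_variant = variant
--     for i in range(len(variant)):
--         if variant[i] not in regular_letters:
--             new_variant = new_variant[1:]
--         else:
--             break
--
--     for i in range(len(variant)-1, -1, -1):
--         if variant[i] not in regular_letters:
--             new_variant = new_variant[:-1]
--         else:
--             break
--
--
--     return new_variant
-- ===== SOURCE B (Python) =====
-- def _lstrip_irregular(s):
--     k = 0
--     while k < len(s) and s[k] not in "AGCT":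
--         k += 1
--     return s[k:]
--
--
-- def crop_variant(variant):
--     front = _lstrip_irregular(variant)
--     return _lstrip_irregular(front[::-1])[::-1]
-- ===== Notes on version B (the rewrite author's own statement) =====
-- stated objective: faster
-- what changed: B finds the first regular letter from each end with two linear scans and takes one slice per side, instead of A's repeated one-character slicing of the whole string inside the loops.
import Mathlib
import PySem

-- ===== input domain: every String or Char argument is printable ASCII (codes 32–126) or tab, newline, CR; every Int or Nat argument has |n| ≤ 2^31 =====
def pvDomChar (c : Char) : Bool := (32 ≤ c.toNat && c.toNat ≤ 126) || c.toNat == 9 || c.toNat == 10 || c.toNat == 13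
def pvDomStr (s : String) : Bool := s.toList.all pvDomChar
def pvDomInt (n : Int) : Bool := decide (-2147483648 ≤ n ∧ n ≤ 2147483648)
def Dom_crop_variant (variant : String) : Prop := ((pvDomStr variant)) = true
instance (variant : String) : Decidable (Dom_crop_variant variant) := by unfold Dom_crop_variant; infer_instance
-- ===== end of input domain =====

-- B replaces A's repeated one-character slicing with one linear scan per end and a single slice per side.


-- ===== PORT A =====
-- module-level: regular_letters = set(['A','G','C','T'])
def regular_letters : List Char := ['A', 'G', 'C', 'T']

-- first for-loop: for i in range(len(variant)): if variant[i] not in regular_letters: nv = nv[1:] else: break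
def crop_loop1 (variant : List Char) : List Nat → List Char → List Char
  | [], nv => nv
  | i :: is, nv =>
    if regular_letters.contains (variant.getD i ' ') then nv
    else crop_loop1 variant is (nv.drop 1)

-- second for-loop: for i in range(len(variant)-1, -1, -1): if variant[i] not in regular_letters: nv = nv[:-1] else: break
def crop_loop2 (variant : List Char) : List Nat → List Char → List Char
  | [], nv => nv
  | i :: is, nv =>
    if regular_letters.contains (variant.getD i ' ') then nv
    else crop_loop2 variant is nv.dropLast

def crop_variant (variant : String) : String :=
  let vs := variant.toList
  let nv1 := crop_loop1 vs (List.range vs.length) vs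
  let nv2 := crop_loop2 vs ((List.range vs.length).reverse) nv1
  String.mk nv2

-- ===== PORT B =====
-- B-side: c in "AGCT"
def isRegular (c : Char) : Bool := c == 'A' || c == 'G' || c == 'C' || c == 'T'

-- _lstrip_irregular: scan past leading non-AGCT characters, one slice
def lstripIrregular : List Char → List Char
  | [] => []
  | c :: cs => if isRegular c then c :: cs else lstripIrregular cs

def crop_variant_alt (variant : String) : String :=
  let front := lstripIrregular variant.toList
  String.mk (lstripIrregular front.reverse).reverse

-- ===== PRECONDITION & SPEC =====
def Spec_crop_variant (variant : String) (out : String) : Prop := out = crop_variant_alt variant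
instance (variant : String) (out : String) : Decidable (Spec_crop_variant variant out) := by unfold Spec_crop_variant; infer_instance

-- ===== CLAIM (what is proved, stated in full; the proofs are below) =====
def Claim_equal_crop_variant : Prop := ∀ (variant : String), Dom_crop_variant variant → Spec_crop_variant variant (crop_variant variant)

-- ===== LEMMAS AND PROOFS =====

def notReg (c : Char) : Bool := !(regular_letters.contains c)

-- iterate dropLast
def dropLastN (l : List Char) : Nat → List Char
  | 0 => l
  | k + 1 => dropLastN l.dropLast k

theorem contains_eq_isRegular (c : Char) : regular_letters.contains c = isRegular c := by
  simp [regular_letters, isRegular, Bool.or_assoc, beq_eq_decide]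

theorem notReg_eq (c : Char) : notReg c = !isRegular c := by
  rw [notReg, contains_eq_isRegular]

theorem lstrip_eq_dropWhile (l : List Char) : lstripIrregular l = l.dropWhile notReg := by
  induction l with
  | nil => rfl
  | cons c cs ih =>
    by_cases h : isRegular c = true
    · have hn : notReg c = false := by rw [notReg_eq, h]; rfl
      simp [lstripIrregular, hn, h]
    · have hf : isRegular c = false := by revert h; cases isRegular c <;> simp
      have hn : notReg c = true := by rw [notReg_eq, hf]; rfl
      simp [lstripIrregular, hn, hf]
      exact ih

theorem loop1_eq (m : Nat) : ∀ (k : Nat) (vs nv : List Char), k + m = vs.length →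
    crop_loop1 vs (List.range' k m) nv = nv.drop (((vs.drop k).takeWhile notReg).length) := by
  induction m with
  | zero =>
    intro k vs nv hk
    have : vs.drop k = [] := List.drop_eq_nil_of_le (by omega)
    simp [crop_loop1, this]
  | succ m ih =>
    intro k vs nv hk
    have hk' : k < vs.length := by omega
    have hdec : vs.drop k = vs[k] :: vs.drop (k + 1) := List.drop_eq_getElem_cons hk'
    have hget : vs.getD k ' ' = vs[k] := List.getD_eq_getElem vs ' ' hk'
    rw [List.range'_succ]
    simp only [crop_loop1, hget]
    by_cases h : regular_letters.contains vs[k] = true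
    · have hn : notReg vs[k] = false := by simpa [notReg] using h
      rw [if_pos h, hdec, List.takeWhile_cons, hn]
      simp
    · have hn : notReg vs[k] = true := by simpa [notReg] using h
      rw [if_neg h, ih (k + 1) vs (nv.drop 1) (by omega), List.drop_drop, hdec,
        List.takeWhile_cons, hn]
      simp [Nat.add_comm]

theorem loop2_eq (m : Nat) : ∀ (vs nv : List Char), m ≤ vs.length →
    crop_loop2 vs ((List.range m).reverse) nv = dropLastN nv (((vs.take m).reverse.takeWhile notReg).length) := by
  induction m with
  | zero => intro vs nv _; simp [crop_loop2, dropLastN]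
  | succ m ih =>
    intro vs nv hm
    have hm' : m < vs.length := by omega
    have hrev : (List.range (m + 1)).reverse = m :: (List.range m).reverse := by
      rw [List.range_succ]; simp
    have htake : (vs.take (m + 1)).reverse = vs[m] :: (vs.take m).reverse := by
      rw [List.take_add_one, List.getElem?_eq_getElem hm']
      simp
    have hget : vs.getD m ' ' = vs[m] := List.getD_eq_getElem vs ' ' hm'
    rw [hrev]
    simp only [crop_loop2, hget]
    by_cases h : regular_letters.contains vs[m] = true
    · have hn : notReg vs[m] = false := by simpa [notReg] using h
      rw [if_pos h, htake, List.takeWhile_cons, hn]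
      simp [dropLastN]
    · have hn : notReg vs[m] = true := by simpa [notReg] using h
      rw [if_neg h, ih vs nv.dropLast (by omega), htake, List.takeWhile_cons, hn]
      simp [dropLastN]

theorem dropLastN_nil (k : Nat) : dropLastN [] k = [] := by
  induction k with
  | zero => rfl
  | succ k ih => simpa [dropLastN] using ih

theorem dropLastN_eq_reverse_drop (k : Nat) : ∀ (l : List Char),
    dropLastN l k = (l.reverse.drop k).reverse := by
  induction k with
  | zero => intro l; simp [dropLastN]
  | succ k ih =>
    intro l
    have hdl : l.dropLast.reverse = l.reverse.tail := by
      have h2 := congrArg List.reverse (List.dropLast_reverse (l := l.reverse))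
      simpa using h2
    show dropLastN l.dropLast k = _
    rw [ih l.dropLast, hdl, ← List.drop_one, List.drop_drop, Nat.add_comm]

-- if some element of l fails p, takeWhile over (l ++ t) never reaches t
theorem takeWhile_append_of_exists {p : Char → Bool} (l t : List Char)
    (h : ∃ x ∈ l, p x = false) : (l ++ t).takeWhile p = l.takeWhile p := by
  induction l with
  | nil => rcases h with ⟨x, hx, _⟩; cases hx
  | cons c cs ih =>
    simp only [List.cons_append, List.takeWhile_cons]
    cases hc : p c with
    | false => simp
    | true =>
      rcases h with ⟨x, hx, hpx⟩
      rcases List.mem_cons.mp hx with rfl | hx'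
      · rw [hc] at hpx; cases hpx
      ·         rw [ih ⟨x, hx', hpx⟩]

theorem dropWhile_eq_drop (l : List Char) (p : Char → Bool) :
    l.dropWhile p = l.drop ((l.takeWhile p).length) := by
  induction l with
  | nil => rfl
  | cons c cs ih =>
    simp only [List.dropWhile_cons, List.takeWhile_cons]
    cases h : p c <;> simp [ih]

theorem crop_core (vs : List Char) :
    crop_loop2 vs ((List.range vs.length).reverse)
      (crop_loop1 vs (List.range vs.length) vs)
    = (lstripIrregular (lstripIrregular vs).reverse).reverse := by
  have h1 : crop_loop1 vs (List.range vs.length) vs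
      = vs.drop ((vs.takeWhile notReg).length) := by
    have h0 := loop1_eq vs.length 0 vs vs (by omega)
    rw [List.range_eq_range']
    simpa using h0
  have hfront : vs.drop ((vs.takeWhile notReg).length) = vs.dropWhile notReg := by
    rw [dropWhile_eq_drop]
  set front := vs.dropWhile notReg with hfrontdef
  have h2 : crop_loop2 vs ((List.range vs.length).reverse) front
      = dropLastN front ((vs.reverse.takeWhile notReg).length) := by
    have := loop2_eq vs.length vs front (le_refl _)
    simpa using this
  rw [h1, hfront, h2, lstrip_eq_dropWhile, lstrip_eq_dropWhile, ← hfrontdef]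
  by_cases hf : front = []
  · rw [hf]; simp [dropLastN_nil]
  · -- front is nonempty and its head is regular
    have hhead : ∃ x ∈ front.reverse, notReg x = false := by
      rcases List.exists_cons_of_ne_nil hf with ⟨c, cs, hc⟩
      have hne : vs.dropWhile notReg ≠ [] := by rw [← hfrontdef]; exact hf
      have h' := List.head_dropWhile_not (p := notReg) hne
      have hcc : (vs.dropWhile notReg).head hne = c := by
        simp [← hfrontdef, hc]
      rw [hcc] at h'
      exact ⟨c, by simp [hc], h'⟩
    have hb : vs.reverse.takeWhile notReg = front.reverse.takeWhile notReg := by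
      have hsplit : vs = vs.takeWhile notReg ++ front := by
        rw [hfrontdef]; exact (List.takeWhile_append_dropWhile).symm
      calc vs.reverse.takeWhile notReg
          = (front.reverse ++ (vs.takeWhile notReg).reverse).takeWhile notReg := by
            conv_lhs => rw [hsplit]
            rw [List.reverse_append]
        _ = front.reverse.takeWhile notReg := takeWhile_append_of_exists _ _ hhead
    rw [hb, dropLastN_eq_reverse_drop, dropWhile_eq_drop]
theorem crop_variant_spec : Claim_equal_crop_variant := by
  intro variant _
  unfold Spec_crop_variant crop_variant crop_variant_alt
  simp only []
  rw [crop_core]
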